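-- pv_equiv track=rewrite | github.com/andrasimion99/CN-Tema3 | main.py | tridiagonal_product
-- ===== SOURCE A (Python) =====
-- def tridiagonal_product(a, b, c, x, y, z):
--     n = len(a)
--     p1 = n - len(c)
--     q1 = n - len(b)
--     p2 = n - len(z)
--     q2 = n - len(y)
--     product = [[] for _ in range(n)]
--     for i in range(n):
--         for j in range(n):
--             sum = 0
--             for k in range(n):
--                 # trebuie sa existe elem in prima matrice pe linia i, col k, iar in a doua matrice pe linia k, col j
--                 value = 0
--                 if k == q1 + i and i < k:
--                     # am element in b[i]
--                     value = b[i]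
--                 elif i - p1 == k and i > k:
--                     # am element in c[i-p1]
--                     value = c[i - p1]
--                 elif i == k:
--                     value = a[i]
--                 if value != 0:
--                     if j == q2 + k and k < j:
--                         # am element in y[k]
--                         sum += value * y[k]
--                     elif k - p2 == j and k > j:
--                         # am element in z[k - p2]
--                         sum += value * z[k - p2]
--                     elif j == k:
--                         sum += value * x[k]
--             if sum != 0:
--                 product[i].append([sum, j])
--     return product
-- ===== SOURCE B (Python) =====
-- def tridiagonal_product(a, b, c, x, y, z):
--     n = len(a)
--     p1 = n - len(c)
--     q1 = n - len(b)
--     p2 = n - len(z)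
--     q2 = n - len(y)
--
--     def second(k, j):
--         # entry of the second matrix at position (k, j)
--         if q2 > 0 and j == k + q2 and j < n:
--             return y[k]
--         if p2 > 0 and j == k - p2 and j >= 0:
--             return z[k - p2]
--         if j == k:
--             return x[k]
--         return 0
--
--     def entry(i, j):
--         s = 0
--         if a[i] != 0:
--             s += a[i] * second(i, j)
--         if q1 > 0 and i + q1 < n and b[i] != 0:
--             s += b[i] * second(i + q1, j)
--         if p1 > 0 and i - p1 >= 0 and c[i - p1] != 0:
--             s += c[i - p1] * second(i - p1, j)
--         return s
--
--     lo_off = (p1 if p1 > 0 else 0) + (p2 if p2 > 0 else 0)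
--     hi_off = (q1 if q1 > 0 else 0) + (q2 if q2 > 0 else 0)
--     product = []
--     for i in range(n):
--         row = []
--         for j in range(max(i - lo_off, 0), min(i + hi_off, n - 1) + 1):
--             s = entry(i, j)
--             if s != 0:
--                 row.append([s, j])
--         product.append(row)
--     return product
-- ===== Notes on version B (the rewrite author's own statement) =====
-- stated objective: faster
-- what changed: Replaced A's triple O(n^3) loop (all i, j, k) by a banded sweep: per row i only the <=3 nonzero band entries of the first matrix and the O(1)-wide window of possibly nonzero product columns are visited, each product entry computed by a closed-form O(1) sum.
import Mathlib
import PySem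

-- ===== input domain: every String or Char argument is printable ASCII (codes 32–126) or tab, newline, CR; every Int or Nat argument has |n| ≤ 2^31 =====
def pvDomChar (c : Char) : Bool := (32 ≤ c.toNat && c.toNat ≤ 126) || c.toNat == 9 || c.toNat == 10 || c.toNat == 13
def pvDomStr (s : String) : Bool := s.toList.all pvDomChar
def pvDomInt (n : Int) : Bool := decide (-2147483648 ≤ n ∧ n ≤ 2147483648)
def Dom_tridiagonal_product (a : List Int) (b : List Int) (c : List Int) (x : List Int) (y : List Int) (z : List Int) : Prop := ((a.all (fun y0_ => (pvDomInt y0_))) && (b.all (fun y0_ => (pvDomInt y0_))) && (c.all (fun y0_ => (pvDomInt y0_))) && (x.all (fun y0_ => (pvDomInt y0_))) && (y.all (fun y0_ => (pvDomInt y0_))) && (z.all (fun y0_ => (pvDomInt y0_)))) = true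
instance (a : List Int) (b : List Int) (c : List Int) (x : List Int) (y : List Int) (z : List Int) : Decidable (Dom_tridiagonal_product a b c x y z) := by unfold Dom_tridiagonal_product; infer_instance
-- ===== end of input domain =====

-- B replaces A's O(n^3) triple loop by a banded O(n·w) sweep (w = band width): per row only the
-- window of possibly nonzero columns is visited and each product entry is computed in O(1).

-- ===== PORT A =====
-- A pre-allocates `product` as n empty rows and, while iterating i, appends only to product[i];
-- the port renders this state-faithfully as a map producing row i at position i.
def tridiagonal_product (a : List Int) (b : List Int) (c : List Int) (x : List Int) (y : List Int) (z : List Int) : List (List (List Int)) :=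
  let n : Int := a.length
  let p1 : Int := n - c.length
  let q1 : Int := n - b.length
  let p2 : Int := n - z.length
  let q2 : Int := n - y.length
  (PySem.List.pyRange 0 n 1).map (fun i =>
    (PySem.List.pyRange 0 n 1).foldl (fun row j =>
      let sum : Int := (PySem.List.pyRange 0 n 1).foldl (fun s k =>
        let value : Int :=
          if k = q1 + i ∧ i < k then PySem.List.pyGetD b i 0
          else if i - p1 = k ∧ i > k then PySem.List.pyGetD c (i - p1) 0
          else if i = k then PySem.List.pyGetD a i 0
          else 0
        if value ≠ 0 then
          if j = q2 + k ∧ k < j then s + value * PySem.List.pyGetD y k 0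
          else if k - p2 = j ∧ k > j then s + value * PySem.List.pyGetD z (k - p2) 0
          else if j = k then s + value * PySem.List.pyGetD x k 0
          else s
        else s) 0
      if sum ≠ 0 then row ++ [[sum, j]] else row) [])

-- ===== PORT B =====
-- entry of the second matrix at position (k, j)   (Source B: `second`)
def pvSecond (n p2 q2 : Int) (x y z : List Int) (k j : Int) : Int :=
  if 0 < q2 ∧ j = k + q2 ∧ j < n then PySem.List.pyGetD y k 0
  else if 0 < p2 ∧ j = k - p2 ∧ 0 ≤ j then PySem.List.pyGetD z (k - p2) 0
  else if j = k then PySem.List.pyGetD x k 0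
  else 0

-- entry (i, j) of the product, from the ≤ 3 band entries of row i of the first matrix   (Source B: `entry`)
def pvEntry (n p1 q1 p2 q2 : Int) (a b c x y z : List Int) (i j : Int) : Int :=
  (if PySem.List.pyGetD a i 0 ≠ 0 then PySem.List.pyGetD a i 0 * pvSecond n p2 q2 x y z i j else 0)
  + (if 0 < q1 ∧ i + q1 < n ∧ PySem.List.pyGetD b i 0 ≠ 0 then PySem.List.pyGetD b i 0 * pvSecond n p2 q2 x y z (i + q1) j else 0)
  + (if 0 < p1 ∧ 0 ≤ i - p1 ∧ PySem.List.pyGetD c (i - p1) 0 ≠ 0 then PySem.List.pyGetD c (i - p1) 0 * pvSecond n p2 q2 x y z (i - p1) j else 0)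

def tridiagonal_product_alt (a : List Int) (b : List Int) (c : List Int) (x : List Int) (y : List Int) (z : List Int) : List (List (List Int)) :=
  let n : Int := a.length
  let p1 : Int := n - c.length
  let q1 : Int := n - b.length
  let p2 : Int := n - z.length
  let q2 : Int := n - y.length
  let loOff : Int := (if 0 < p1 then p1 else 0) + (if 0 < p2 then p2 else 0)
  let hiOff : Int := (if 0 < q1 then q1 else 0) + (if 0 < q2 then q2 else 0)
  (PySem.List.pyRange 0 n 1).map (fun i =>
    (PySem.List.pyRange (max (i - loOff) 0) (min (i + hiOff) (n - 1) + 1) 1).foldl (fun row j =>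
      let s : Int := pvEntry n p1 q1 p2 q2 a b c x y z i j
      if s ≠ 0 then row ++ [[s, j]] else row) [])

-- ===== PRECONDITION & SPEC =====
-- Pre_ excludes exactly the inputs on which Python A raises IndexError: x[k] is read for every
-- column k < len(a) that carries a nonzero band entry of the first matrix, so all such k must be < len(x).
def Pre_tridiagonal_product (a : List Int) (b : List Int) (c : List Int) (x : List Int) (y : List Int) (z : List Int) : Prop :=
  ∀ k : Nat, k < a.length → x.length ≤ k →
    (a.getD k 0 = 0
     ∧ (0 < (a.length : Int) - b.length → 0 ≤ (k : Int) - ((a.length : Int) - b.length) →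
          b.getD ((k : Int) - ((a.length : Int) - b.length)).toNat 0 = 0)
     ∧ (0 < (a.length : Int) - c.length → (k : Int) + ((a.length : Int) - c.length) < a.length →
          c.getD k 0 = 0))
instance (a : List Int) (b : List Int) (c : List Int) (x : List Int) (y : List Int) (z : List Int) : Decidable (Pre_tridiagonal_product a b c x y z) := by unfold Pre_tridiagonal_product; infer_instance

def pvWitness_tridiagonal_product : List Int × List Int × List Int × List Int × List Int × List Int :=
  ([1, 2, 3], [4, 5], [6, 7], [1, 0, 2], [3, 1], [2, 5])

def Spec_tridiagonal_product (a : List Int) (b : List Int) (c : List Int) (x : List Int) (y : List Int) (z : List Int) (out : List (List (List Int))) : Prop := out = tridiagonal_product_alt a b c x y z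
instance (a : List Int) (b : List Int) (c : List Int) (x : List Int) (y : List Int) (z : List Int) (out : List (List (List Int))) : Decidable (Spec_tridiagonal_product a b c x y z out) := by unfold Spec_tridiagonal_product; infer_instance

-- ===== CLAIM (what is proved, stated in full; the proofs are below) =====
def Claim_equal_tridiagonal_product : Prop := ∀ (a : List Int) (b : List Int) (c : List Int) (x : List Int) (y : List Int) (z : List Int), Dom_tridiagonal_product a b c x y z → Pre_tridiagonal_product a b c x y z → Spec_tridiagonal_product a b c x y z (tridiagonal_product a b c x y z)


-- ===== LEMMAS AND PROOFS =====

-- the band entry of the first matrix that A's inner loop selects at column k of row i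
def pvVal (q1 p1 : Int) (a b c : List Int) (i k : Int) : Int :=
  if k = q1 + i ∧ i < k then PySem.List.pyGetD b i 0
  else if i - p1 = k ∧ i > k then PySem.List.pyGetD c (i - p1) 0
  else if i = k then PySem.List.pyGetD a i 0
  else 0

theorem pv_sum_map_point (t : Int → Int) (c0 : Int) : ∀ (L : List Int), L.Nodup →
    (L.map (fun k => if k = c0 then t k else 0)).sum = if c0 ∈ L then t c0 else 0 := by
  intro L
  induction L with
  | nil => intro _; simp
  | cons hd tl ih =>
    intro hL
    obtain ⟨hhd, htl⟩ := List.nodup_cons.mp hL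
    simp only [List.map_cons, List.sum_cons, List.mem_cons, ih htl]
    rcases eq_or_ne hd c0 with h | h
    · subst h
      rw [if_pos rfl, if_pos (Or.inl rfl), if_neg hhd, add_zero]
    · rw [if_neg h, zero_add]
      by_cases hm : c0 ∈ tl
      · rw [if_pos hm, if_pos (Or.inr hm)]
      · rw [if_neg hm, if_neg (by rintro (h' | h') <;> [exact h h'.symm; exact hm h'])]

theorem pv_step_eq (n p2 q2 j : Int) (x y z : List Int) (hj0 : 0 ≤ j) (hjn : j < n)
    (v s k : Int) :
    (if v ≠ 0 then
      if j = q2 + k ∧ k < j then s + v * PySem.List.pyGetD y k 0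
      else if k - p2 = j ∧ k > j then s + v * PySem.List.pyGetD z (k - p2) 0
      else if j = k then s + v * PySem.List.pyGetD x k 0
      else s
    else s)
    = s + v * pvSecond n p2 q2 x y z k j := by
  unfold pvSecond
  rcases eq_or_ne v 0 with hv | hv
  · subst hv; simp
  · rw [if_pos hv]
    split_ifs <;> first | (exfalso; omega) | ring

theorem pv_val_decomp (a b c : List Int) (q1 p1 i k w : Int) :
    pvVal q1 p1 a b c i k * w
    = (if k = i then PySem.List.pyGetD a i 0 * w else 0)
      + (if 0 < q1 ∧ k = i + q1 then PySem.List.pyGetD b i 0 * w else 0)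
      + (if 0 < p1 ∧ k = i - p1 then PySem.List.pyGetD c (i - p1) 0 * w else 0) := by
  unfold pvVal
  split_ifs <;> first | (exfalso; omega) | ring

theorem pv_second_zero (n p2 q2 : Int) (x y z : List Int) (k j P2 Q2 : Int)
    (hp : p2 ≤ P2) (hq : q2 ≤ Q2) (hP : 0 ≤ P2) (hQ : 0 ≤ Q2)
    (h : j < k - P2 ∨ k + Q2 < j) : pvSecond n p2 q2 x y z k j = 0 := by
  unfold pvSecond
  split_ifs <;> first | (exfalso; omega) | rfl

theorem pv_entry_zero (a b c x y z : List Int) (n p1 q1 p2 q2 i j P1 P2 Q1 Q2 : Int)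
    (hp1 : p1 ≤ P1) (hp2 : p2 ≤ P2) (hq1 : q1 ≤ Q1) (hq2 : q2 ≤ Q2)
    (hP1 : 0 ≤ P1) (hP2 : 0 ≤ P2) (hQ1 : 0 ≤ Q1) (hQ2 : 0 ≤ Q2)
    (h : j < i - P1 - P2 ∨ i + Q1 + Q2 < j) :
    pvEntry n p1 q1 p2 q2 a b c x y z i j = 0 := by
  have t1 : (if PySem.List.pyGetD a i 0 ≠ 0 then PySem.List.pyGetD a i 0 * pvSecond n p2 q2 x y z i j else 0) = 0 := by
    rw [pv_second_zero n p2 q2 x y z i j P2 Q2 hp2 hq2 hP2 hQ2 (by omega)]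
    split_ifs <;> ring
  have t2 : (if 0 < q1 ∧ i + q1 < n ∧ PySem.List.pyGetD b i 0 ≠ 0 then PySem.List.pyGetD b i 0 * pvSecond n p2 q2 x y z (i + q1) j else 0) = 0 := by
    by_cases hb : 0 < q1 ∧ i + q1 < n ∧ PySem.List.pyGetD b i 0 ≠ 0
    · rw [if_pos hb, pv_second_zero n p2 q2 x y z (i + q1) j P2 Q2 hp2 hq2 hP2 hQ2 (by omega)]
      ring
    · rw [if_neg hb]
  have t3 : (if 0 < p1 ∧ 0 ≤ i - p1 ∧ PySem.List.pyGetD c (i - p1) 0 ≠ 0 then PySem.List.pyGetD c (i - p1) 0 * pvSecond n p2 q2 x y z (i - p1) j else 0) = 0 := by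
    by_cases hc : 0 < p1 ∧ 0 ≤ i - p1 ∧ PySem.List.pyGetD c (i - p1) 0 ≠ 0
    · rw [if_pos hc, pv_second_zero n p2 q2 x y z (i - p1) j P2 Q2 hp2 hq2 hP2 hQ2 (by omega)]
      ring
    · rw [if_neg hc]
  unfold pvEntry
  rw [t1, t2, t3]
  ring

theorem pv_foldl_rowfun_id (e : Int → Int) (L : List Int) (h : ∀ j ∈ L, e j = 0) :
    ∀ acc : List (List Int),
      L.foldl (fun row j => if e j ≠ 0 then row ++ [[e j, j]] else row) acc = acc := by
  induction L with
  | nil => intro acc; rfl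
  | cons hd tl ih =>
    intro acc
    simp only [List.foldl_cons]
    rw [if_neg (by simp [h hd List.mem_cons_self])]
    exact ih (fun j hj => h j (List.mem_cons_of_mem _ hj)) acc

theorem pv_inner_sum (a b c x y z : List Int) (n p1 q1 p2 q2 i j : Int)
    (hi0 : 0 ≤ i) (hin : i < n) (hj0 : 0 ≤ j) (hjn : j < n) :
    (PySem.List.pyRange 0 n 1).foldl (fun s k =>
      if pvVal q1 p1 a b c i k ≠ 0 then
        if j = q2 + k ∧ k < j then s + pvVal q1 p1 a b c i k * PySem.List.pyGetD y k 0
        else if k - p2 = j ∧ k > j then s + pvVal q1 p1 a b c i k * PySem.List.pyGetD z (k - p2) 0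
        else if j = k then s + pvVal q1 p1 a b c i k * PySem.List.pyGetD x k 0
        else s
      else s) 0
    = pvEntry n p1 q1 p2 q2 a b c x y z i j := by
  have hL : (PySem.List.pyRange 0 n 1).Nodup := PySem.List.nodup_pyRange_one 0 n
  have h1 : (PySem.List.pyRange 0 n 1).foldl (fun s k =>
      if pvVal q1 p1 a b c i k ≠ 0 then
        if j = q2 + k ∧ k < j then s + pvVal q1 p1 a b c i k * PySem.List.pyGetD y k 0
        else if k - p2 = j ∧ k > j then s + pvVal q1 p1 a b c i k * PySem.List.pyGetD z (k - p2) 0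
        else if j = k then s + pvVal q1 p1 a b c i k * PySem.List.pyGetD x k 0
        else s
      else s) 0
      = (PySem.List.pyRange 0 n 1).foldl
          (fun s k => s + pvVal q1 p1 a b c i k * pvSecond n p2 q2 x y z k j) 0 :=
    PySem.List.foldl_congr_mem _ _ _ 0
      (fun s k _ => pv_step_eq n p2 q2 j x y z hj0 hjn (pvVal q1 p1 a b c i k) s k)
  rw [h1, PySem.List.foldl_add, zero_add]
  have hdec : ((PySem.List.pyRange 0 n 1).map
        (fun k => pvVal q1 p1 a b c i k * pvSecond n p2 q2 x y z k j)).sum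
      = ((PySem.List.pyRange 0 n 1).map
          (fun k => if k = i then PySem.List.pyGetD a i 0 * pvSecond n p2 q2 x y z k j else 0)).sum
        + ((PySem.List.pyRange 0 n 1).map
            (fun k => if 0 < q1 ∧ k = i + q1 then PySem.List.pyGetD b i 0 * pvSecond n p2 q2 x y z k j else 0)).sum
        + ((PySem.List.pyRange 0 n 1).map
            (fun k => if 0 < p1 ∧ k = i - p1 then PySem.List.pyGetD c (i - p1) 0 * pvSecond n p2 q2 x y z k j else 0)).sum := by
    rw [show (PySem.List.pyRange 0 n 1).map
          (fun k => pvVal q1 p1 a b c i k * pvSecond n p2 q2 x y z k j)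
        = (PySem.List.pyRange 0 n 1).map
          (fun k =>
            ((if k = i then PySem.List.pyGetD a i 0 * pvSecond n p2 q2 x y z k j else 0)
              + (if 0 < q1 ∧ k = i + q1 then PySem.List.pyGetD b i 0 * pvSecond n p2 q2 x y z k j else 0))
            + (if 0 < p1 ∧ k = i - p1 then PySem.List.pyGetD c (i - p1) 0 * pvSecond n p2 q2 x y z k j else 0)) from
      List.map_congr_left (fun k _ => pv_val_decomp a b c q1 p1 i k (pvSecond n p2 q2 x y z k j))]
    rw [PySem.List.sum_map_add_int, PySem.List.sum_map_add_int]
  rw [hdec]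
  have ha' : ((PySem.List.pyRange 0 n 1).map
        (fun k => if k = i then PySem.List.pyGetD a i 0 * pvSecond n p2 q2 x y z k j else 0)).sum
      = (if PySem.List.pyGetD a i 0 ≠ 0 then PySem.List.pyGetD a i 0 * pvSecond n p2 q2 x y z i j else 0) := by
    rw [pv_sum_map_point _ i _ hL, if_pos (PySem.List.mem_pyRange_one.mpr ⟨hi0, hin⟩)]
    rcases eq_or_ne (PySem.List.pyGetD a i 0) 0 with h | h
    · rw [h, if_neg (by simp)]; ring
    · rw [if_pos h]
  have hb' : ((PySem.List.pyRange 0 n 1).map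
        (fun k => if 0 < q1 ∧ k = i + q1 then PySem.List.pyGetD b i 0 * pvSecond n p2 q2 x y z k j else 0)).sum
      = (if 0 < q1 ∧ i + q1 < n ∧ PySem.List.pyGetD b i 0 ≠ 0 then PySem.List.pyGetD b i 0 * pvSecond n p2 q2 x y z (i + q1) j else 0) := by
    by_cases hq : 0 < q1
    · rw [show (fun k => if 0 < q1 ∧ k = i + q1 then PySem.List.pyGetD b i 0 * pvSecond n p2 q2 x y z k j else 0)
          = (fun k => if k = (i + q1) then PySem.List.pyGetD b i 0 * pvSecond n p2 q2 x y z k j else 0) from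
        funext (fun k => by simp [hq])]
      rw [pv_sum_map_point _ (i + q1) _ hL]
      simp only [PySem.List.mem_pyRange_one]
      by_cases hb : PySem.List.pyGetD b i 0 = 0
      · rw [hb]; split_ifs <;> ring
      · split_ifs <;> first | (exfalso; omega) | rfl
    · simp [hq]
  have hc' : ((PySem.List.pyRange 0 n 1).map
        (fun k => if 0 < p1 ∧ k = i - p1 then PySem.List.pyGetD c (i - p1) 0 * pvSecond n p2 q2 x y z k j else 0)).sum
      = (if 0 < p1 ∧ 0 ≤ i - p1 ∧ PySem.List.pyGetD c (i - p1) 0 ≠ 0 then PySem.List.pyGetD c (i - p1) 0 * pvSecond n p2 q2 x y z (i - p1) j else 0) := by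
    by_cases hp : 0 < p1
    · rw [show (fun k => if 0 < p1 ∧ k = i - p1 then PySem.List.pyGetD c (i - p1) 0 * pvSecond n p2 q2 x y z k j else 0)
          = (fun k => if k = (i - p1) then PySem.List.pyGetD c (i - p1) 0 * pvSecond n p2 q2 x y z k j else 0) from
        funext (fun k => by simp [hp])]
      rw [pv_sum_map_point _ (i - p1) _ hL]
      simp only [PySem.List.mem_pyRange_one]
      by_cases hc : PySem.List.pyGetD c (i - p1) 0 = 0
      · rw [hc]; split_ifs <;> ring
      · split_ifs <;> first | (exfalso; omega) | rfl
    · simp [hp]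
  rw [ha', hb', hc']
  rfl

theorem pv_row_eq (a b c x y z : List Int) (n p1 q1 p2 q2 i : Int)
    (hi0 : 0 ≤ i) (hin : i < n) :
    (PySem.List.pyRange 0 n 1).foldl (fun row j =>
      if ((PySem.List.pyRange 0 n 1).foldl (fun s k =>
            if pvVal q1 p1 a b c i k ≠ 0 then
              if j = q2 + k ∧ k < j then s + pvVal q1 p1 a b c i k * PySem.List.pyGetD y k 0
              else if k - p2 = j ∧ k > j then s + pvVal q1 p1 a b c i k * PySem.List.pyGetD z (k - p2) 0
              else if j = k then s + pvVal q1 p1 a b c i k * PySem.List.pyGetD x k 0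
              else s
            else s) 0) ≠ 0 then
        row ++ [[(PySem.List.pyRange 0 n 1).foldl (fun s k =>
            if pvVal q1 p1 a b c i k ≠ 0 then
              if j = q2 + k ∧ k < j then s + pvVal q1 p1 a b c i k * PySem.List.pyGetD y k 0
              else if k - p2 = j ∧ k > j then s + pvVal q1 p1 a b c i k * PySem.List.pyGetD z (k - p2) 0
              else if j = k then s + pvVal q1 p1 a b c i k * PySem.List.pyGetD x k 0
              else s
            else s) 0, j]]
      else row) []
    = (PySem.List.pyRange (max (i - ((if 0 < p1 then p1 else 0) + (if 0 < p2 then p2 else 0))) 0)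
        (min (i + ((if 0 < q1 then q1 else 0) + (if 0 < q2 then q2 else 0))) (n - 1) + 1) 1).foldl
        (fun row j =>
          if pvEntry n p1 q1 p2 q2 a b c x y z i j ≠ 0 then
            row ++ [[pvEntry n p1 q1 p2 q2 a b c x y z i j, j]]
          else row) [] := by
  have hP1 : p1 ≤ (if 0 < p1 then p1 else 0) ∧ 0 ≤ (if 0 < p1 then p1 else 0) := by
    split <;> omega
  have hP2 : p2 ≤ (if 0 < p2 then p2 else 0) ∧ 0 ≤ (if 0 < p2 then p2 else 0) := by
    split <;> omega
  have hQ1 : q1 ≤ (if 0 < q1 then q1 else 0) ∧ 0 ≤ (if 0 < q1 then q1 else 0) := by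
    split <;> omega
  have hQ2 : q2 ≤ (if 0 < q2 then q2 else 0) ∧ 0 ≤ (if 0 < q2 then q2 else 0) := by
    split <;> omega
  set P1 := (if 0 < p1 then p1 else 0) with hP1def
  set P2 := (if 0 < p2 then p2 else 0) with hP2def
  set Q1 := (if 0 < q1 then q1 else 0) with hQ1def
  set Q2 := (if 0 < q2 then q2 else 0) with hQ2def
  set lo := max (i - (P1 + P2)) 0 with hlodef
  set hi := min (i + (Q1 + Q2)) (n - 1) + 1 with hhidef
  refine Eq.trans (PySem.List.foldl_congr_mem (PySem.List.pyRange 0 n 1) _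
    (fun (row : List (List Int)) j =>
      if pvEntry n p1 q1 p2 q2 a b c x y z i j ≠ 0 then
        row ++ [[pvEntry n p1 q1 p2 q2 a b c x y z i j, j]]
      else row) []
    (fun row j hj => ?_)) ?_
  · obtain ⟨hj0, hjn⟩ := PySem.List.mem_pyRange_one.mp hj
    simp only [pv_inner_sum a b c x y z n p1 q1 p2 q2 i j hi0 hin hj0 hjn]
  have hzero_pre : ∀ j ∈ PySem.List.pyRange 0 lo 1, pvEntry n p1 q1 p2 q2 a b c x y z i j = 0 := by
    intro j hj
    obtain ⟨hj0, hjlo⟩ := PySem.List.mem_pyRange_one.mp hj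
    exact pv_entry_zero a b c x y z n p1 q1 p2 q2 i j P1 P2 Q1 Q2
      hP1.1 hP2.1 hQ1.1 hQ2.1 hP1.2 hP2.2 hQ1.2 hQ2.2 (by omega)
  have hzero_suf : ∀ j ∈ PySem.List.pyRange hi n 1, pvEntry n p1 q1 p2 q2 a b c x y z i j = 0 := by
    intro j hj
    obtain ⟨hjhi, hjn⟩ := PySem.List.mem_pyRange_one.mp hj
    exact pv_entry_zero a b c x y z n p1 q1 p2 q2 i j P1 P2 Q1 Q2
      hP1.1 hP2.1 hQ1.1 hQ2.1 hP1.2 hP2.2 hQ1.2 hQ2.2 (by omega)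
  have hlo0 : (0 : Int) ≤ lo := by omega
  have hlon : lo ≤ hi := by omega
  have hhin : hi ≤ n := by omega
  rw [PySem.List.pyRange_one_append 0 lo n hlo0 (by omega), List.foldl_append]
  rw [pv_foldl_rowfun_id (fun j => pvEntry n p1 q1 p2 q2 a b c x y z i j) _ hzero_pre []]
  rw [PySem.List.pyRange_one_append lo hi n hlon hhin, List.foldl_append]
  rw [pv_foldl_rowfun_id (fun j => pvEntry n p1 q1 p2 q2 a b c x y z i j) _ hzero_suf]

theorem tridiagonal_product_eq_alt (a b c x y z : List Int) :
    tridiagonal_product a b c x y z = tridiagonal_product_alt a b c x y z := by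
  unfold tridiagonal_product tridiagonal_product_alt
  exact List.map_congr_left (fun i hi =>
    pv_row_eq a b c x y z (a.length : Int) ((a.length : Int) - c.length)
      ((a.length : Int) - b.length) ((a.length : Int) - z.length) ((a.length : Int) - y.length) i
      (PySem.List.mem_pyRange_one.mp hi).1 (PySem.List.mem_pyRange_one.mp hi).2)

-- ===== VERDICT (by name: the statement is the Claim_ definition above) =====
theorem tridiagonal_product_spec : Claim_equal_tridiagonal_product := by
  intro a b c x y z _ _
  unfold Spec_tridiagonal_product
  exact tridiagonal_product_eq_alt a b c x y z
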